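-- pv_equiv track=rewrite | github.com/Mostafa-Mahdi/Programmering-C | DTU Eksamen øvelse/jan 2020/dice_sum_count.py | dice_sum_count
-- ===== SOURCE A (Python) =====
-- def dice_sum_count(threshold, dice):
--     count = 0
--     if dice == 1:
--         for first in range(1, 7):
--             if first <= threshold:
--                 count += 1
--     elif dice == 2:
--         for first in range(1, 7):
--             for second in range(1, 7):
--                 if (first + second) <= threshold:
--                     count += 1
--     elif dice == 3:
--         for first in range(1, 7):
--             for second in range(1, 7):
--                 for third in range(1, 7):
--                     if (first + second + third) <= threshold:
--                         count += 1
--     return count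
-- ===== SOURCE B (Python) =====
-- def dice_sum_count(threshold, dice):
--     if dice not in (1, 2, 3):
--         return 0
--     freq = {0: 1}
--     for _ in range(dice):
--         new = {}
--         for s, c in freq.items():
--             for face in range(1, 7):
--                 new[s + face] = new.get(s + face, 0) + c
--         freq = new
--     return sum(c for s, c in freq.items() if s <= threshold)
-- ===== Notes on version B (the rewrite author's own statement) =====
-- stated objective: alternative
-- what changed: Replaces the hard-coded nested face loops (one loop nest per dice count) with a convolution DP that maintains a sum->count frequency table, one dict pass per die, and sums the counts of sums <= threshold.
import Mathlib
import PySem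

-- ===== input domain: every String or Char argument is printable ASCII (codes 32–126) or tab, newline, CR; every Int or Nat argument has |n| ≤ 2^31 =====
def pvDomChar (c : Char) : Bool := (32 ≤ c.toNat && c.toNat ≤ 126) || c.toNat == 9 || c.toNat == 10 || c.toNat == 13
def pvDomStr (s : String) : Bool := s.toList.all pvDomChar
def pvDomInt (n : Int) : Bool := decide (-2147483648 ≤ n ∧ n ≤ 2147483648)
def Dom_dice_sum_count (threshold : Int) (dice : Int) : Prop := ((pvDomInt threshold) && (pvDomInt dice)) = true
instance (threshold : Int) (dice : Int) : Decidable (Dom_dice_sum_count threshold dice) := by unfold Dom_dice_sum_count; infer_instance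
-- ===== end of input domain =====

set_option maxRecDepth 4000


-- B replaces the hard-coded nested face loops (one loop nest per dice count) with a
-- convolution DP over a sum→count frequency table; same results, different algorithm.

-- ===== PORT A =====
def dice_sum_count (threshold : Int) (dice : Int) : Int :=
  let count : Int := 0
  if dice = 1 then
    (PySem.List.pyRange 1 7 1).foldl
      (fun count first => if first ≤ threshold then count + 1 else count) count
  else if dice = 2 then
    (PySem.List.pyRange 1 7 1).foldl
      (fun count first =>
        (PySem.List.pyRange 1 7 1).foldl
          (fun count second => if first + second ≤ threshold then count + 1 else count) count)
      count
  else if dice = 3 then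
    (PySem.List.pyRange 1 7 1).foldl
      (fun count first =>
        (PySem.List.pyRange 1 7 1).foldl
          (fun count second =>
            (PySem.List.pyRange 1 7 1).foldl
              (fun count third =>
                if first + second + third ≤ threshold then count + 1 else count) count)
          count)
      count
  else count

-- ===== PORT B =====
-- the convolution: freq = {0:1}; for each die, new[s+face] = new.get(s+face,0) + c
def dice_conv (dice : Int) : PySem.Dict Int Int :=
  (PySem.List.pyRange 0 dice 1).foldl
    (fun freq _ =>
      freq.items.foldl
        (fun new sc =>
          (PySem.List.pyRange 1 7 1).foldl
            (fun new face => new.insert (sc.1 + face) (new.getD (sc.1 + face) 0 + sc.2)) new)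
        PySem.Dict.empty)
    (PySem.Dict.empty.insert 0 1)

def dice_sum_count_alt (threshold : Int) (dice : Int) : Int :=
  if ¬ (dice = 1 ∨ dice = 2 ∨ dice = 3) then 0
  else
    (dice_conv dice).items.foldl
      (fun acc sc => if sc.1 ≤ threshold then acc + sc.2 else acc) 0

-- ===== PRECONDITION & SPEC =====
def Spec_dice_sum_count (threshold : Int) (dice : Int) (out : Int) : Prop := out = dice_sum_count_alt threshold dice
instance (threshold : Int) (dice : Int) (out : Int) : Decidable (Spec_dice_sum_count threshold dice out) := by unfold Spec_dice_sum_count; infer_instance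

-- ===== CLAIM (what is proved, stated in full; the proofs are below) =====
def Claim_equal_dice_sum_count : Prop := ∀ (threshold : Int) (dice : Int), Dom_dice_sum_count threshold dice → Spec_dice_sum_count threshold dice (dice_sum_count threshold dice)

-- ===== LEMMAS AND PROOFS =====

-- Every comparison either program makes is 's ≤ threshold' with 1 ≤ s ≤ 18,
-- so both depend on the threshold only through its clamp to [0, 18].
def clampT (t : Int) : Int := max 0 (min t 18)

theorem A_congr (t c d : Int) (h : ∀ s : Int, 1 ≤ s → s ≤ 18 → ((s ≤ t) ↔ (s ≤ c))) :
    dice_sum_count t d = dice_sum_count c d := by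
  unfold dice_sum_count
  split_ifs with h1 h2 h3
  · apply PySem.List.foldl_congr_mem'
    intro x hx acc
    rw [PySem.List.mem_pyRange_one] at hx
    exact if_congr (h x (by omega) (by omega)) rfl rfl
  · apply PySem.List.foldl_congr_mem'
    intro x hx acc
    rw [PySem.List.mem_pyRange_one] at hx
    apply PySem.List.foldl_congr_mem'
    intro y hy acc2
    rw [PySem.List.mem_pyRange_one] at hy
    exact if_congr (h (x + y) (by omega) (by omega)) rfl rfl
  · apply PySem.List.foldl_congr_mem'
    intro x hx acc
    rw [PySem.List.mem_pyRange_one] at hx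
    apply PySem.List.foldl_congr_mem'
    intro y hy acc2
    rw [PySem.List.mem_pyRange_one] at hy
    apply PySem.List.foldl_congr_mem'
    intro z hz acc3
    rw [PySem.List.mem_pyRange_one] at hz
    exact if_congr (h (x + y + z) (by omega) (by omega)) rfl rfl
  · rfl

theorem B_congr (t c d : Int) (h : ∀ s : Int, 1 ≤ s → s ≤ 18 → ((s ≤ t) ↔ (s ≤ c))) :
    dice_sum_count_alt t d = dice_sum_count_alt c d := by
  unfold dice_sum_count_alt
  split_ifs with h1
  · have hd : d = 1 ∨ d = 2 ∨ d = 3 := by tauto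
    have hb : ∀ sc ∈ (dice_conv d).items, 1 ≤ sc.1 ∧ sc.1 ≤ 18 := by
      rcases hd with h' | h' | h' <;> subst h' <;> decide
    apply PySem.List.foldl_congr_mem'
    intro x hx acc
    have := hb x hx
    exact if_congr (h x.1 this.1 this.2) rfl rfl
  · rfl

-- ===== VERDICT (by name: the statement is the Claim_ definition above) =====
theorem dice_sum_count_spec : Claim_equal_dice_sum_count := by
  intro t d _
  show dice_sum_count t d = dice_sum_count_alt t d
  have hc : ∀ s : Int, 1 ≤ s → s ≤ 18 → ((s ≤ t) ↔ (s ≤ clampT t)) := by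
    intro s h1 h2; unfold clampT; omega
  rw [A_congr t (clampT t) d hc, B_congr t (clampT t) d hc]
  have hb : 0 ≤ clampT t ∧ clampT t ≤ 18 := by unfold clampT; omega
  obtain ⟨hb1, hb2⟩ := hb
  by_cases h1 : d = 1
  · subst h1; interval_cases (clampT t) <;> decide
  · by_cases h2 : d = 2
    · subst h2; interval_cases (clampT t) <;> decide
    · by_cases h3 : d = 3
      · subst h3; interval_cases (clampT t) <;> decide
      · simp [dice_sum_count, dice_sum_count_alt, h1, h2, h3]
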